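-- pv_equiv track=rewrite | github.com/Trixciel/info2 | prg.py | premier_avec_N
-- ===== SOURCE A (Python) =====
-- def premier_avec_N(N):
--     for i in range(2,N):
--         premier_bool=True
--         for j in range(2,N):
--             if (i*j)%N==0:
--                 premier_bool=False
--         if premier_bool:
--             return i
--     return None
-- ===== SOURCE B (Python) =====
-- def premier_avec_N(N):
--     def gcd(a, b):
--         while b:
--             a, b = b, a % b
--         return a
--     for i in range(2, N):
--         if gcd(N, i) == 1:
--             return i
--     return None
-- ===== Notes on version B (the rewrite author's own statement) =====
-- stated objective: faster
-- what changed: A's inner scan over all j in the range, testing whether i*j is a multiple of N, is replaced by a hand-written Euclid gcd test per candidate: B returns the first i in the range that is coprime to N.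
import Mathlib
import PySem

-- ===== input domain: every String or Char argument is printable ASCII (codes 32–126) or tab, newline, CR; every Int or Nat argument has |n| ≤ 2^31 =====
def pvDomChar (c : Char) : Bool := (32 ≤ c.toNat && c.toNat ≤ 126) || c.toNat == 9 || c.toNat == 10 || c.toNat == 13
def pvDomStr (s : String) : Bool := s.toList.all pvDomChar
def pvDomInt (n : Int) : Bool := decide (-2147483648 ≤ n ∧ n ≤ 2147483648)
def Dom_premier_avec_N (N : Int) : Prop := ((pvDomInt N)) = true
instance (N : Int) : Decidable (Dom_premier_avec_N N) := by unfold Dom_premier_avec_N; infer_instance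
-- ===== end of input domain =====

-- B replaces A's quadratic inner scan over range(2,N) by a hand-written Euclid gcd test per candidate (faster).

-- ===== PORT A =====
-- inner 'for j in range(2,N)' loop updating premier_bool
def premierInner (N i : Int) : Bool :=
  (PySem.List.pyRange 2 N 1).foldl
    (fun b j => if PySem.Int.mod (i * j) N == 0 then false else b) true

-- outer 'for i in range(2,N)' with early return
def premierLoop (N : Int) : List Int → Option Int
  | [] => none
  | i :: rest => if premierInner N i then some i else premierLoop N rest

def premier_avec_N (N : Int) : Option Int :=
  premierLoop N (PySem.List.pyRange 2 N 1)

-- ===== PORT B =====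
-- termination fact for Euclid's loop (used by pyGcd's decreasing_by)
theorem pyMod_natAbs_lt (a b : Int) (h : ¬ b = 0) :
    (PySem.Int.mod a b).natAbs < b.natAbs := by
  rcases lt_or_gt_of_ne h with hb | hb
  · have := PySem.Int.mod_neg_bounds a hb
    omega
  · have h1 := PySem.Int.mod_nonneg a hb
    have h2 := PySem.Int.mod_lt a hb
    omega

-- 'while b: a, b = b, a % b; return a'
def pyGcd (a b : Int) : Int :=
  if _h : b = 0 then a else pyGcd b (PySem.Int.mod a b)
  termination_by b.natAbs
  decreasing_by exact pyMod_natAbs_lt a b _h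

-- 'for i in range(2,N): if gcd(N,i)==1: return i'
def altLoop (N : Int) : List Int → Option Int
  | [] => none
  | i :: rest => if pyGcd N i == 1 then some i else altLoop N rest

def premier_avec_N_alt (N : Int) : Option Int :=
  altLoop N (PySem.List.pyRange 2 N 1)

-- ===== PRECONDITION & SPEC =====
def Spec_premier_avec_N (N : Int) (out : Option Int) : Prop := out = premier_avec_N_alt N
instance (N : Int) (out : Option Int) : Decidable (Spec_premier_avec_N N out) := by unfold Spec_premier_avec_N; infer_instance

-- ===== CLAIM (what is proved, stated in full; the proofs are below) =====
def Claim_equal_premier_avec_N : Prop := ∀ (N : Int), Dom_premier_avec_N N → Spec_premier_avec_N N (premier_avec_N N)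

-- ===== LEMMAS AND PROOFS =====

-- the inner flag-loop is an 'all'
theorem foldl_flag (p : Int → Bool) :
    ∀ (l : List Int) (b : Bool),
      l.foldl (fun acc j => if p j then false else acc) b
        = (b && l.all (fun j => !p j)) := by
  intro l
  induction l with
  | nil => intro b; simp
  | cons x xs ih =>
      intro b
      simp only [List.foldl_cons, List.all_cons, ih]
      cases hp : p x <;> cases b <;> simp_all

-- Euclid on nonnegative inputs computes Int.gcd
theorem pyGcd_eq_gcd_aux : ∀ (n : Nat) (a b : Int), b.natAbs ≤ n → 0 ≤ a → 0 ≤ b →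
    pyGcd a b = (Int.gcd a b : Int) := by
  intro n
  induction n with
  | zero =>
      intro a b hn ha hb
      have hb0 : b = 0 := by omega
      subst hb0
      rw [pyGcd]
      simp [Int.natAbs_of_nonneg ha]
  | succ n ih =>
      intro a b hn ha hb
      by_cases h0 : b = 0
      · subst h0
        rw [pyGcd]
        simp [Int.natAbs_of_nonneg ha]
      · have hbpos : 0 < b := by omega
        rw [pyGcd]
        simp only [h0, dif_neg, not_false_iff]
        rw [PySem.Int.mod_eq_emod_of_pos hbpos]
        have hlt : (a % b).natAbs < b.natAbs := by
          have h1 := Int.emod_nonneg a h0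
          have h2 := Int.emod_lt_of_pos a hbpos
          omega
        rw [ih b (a % b) (by omega) (by omega) (Int.emod_nonneg a h0)]
        rw [Int.gcd_comm b (a % b), Int.gcd_emod a b]

theorem pyGcd_eq_gcd (a b : Int) (ha : 0 ≤ a) (hb : 0 ≤ b) : pyGcd a b = (Int.gcd a b : Int) :=
  pyGcd_eq_gcd_aux b.natAbs a b le_rfl ha hb

-- math core: no j ∈ [2,N) with N ∣ i*j  ↔  gcd N i = 1
theorem no_multiple_iff_coprime (N i : Int) (hN : 3 ≤ N) (hi2 : 2 ≤ i) (hiN : i < N) :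
    (∀ j : Int, 2 ≤ j → j < N → ¬ (N ∣ i * j)) ↔ Int.gcd N i = 1 := by
  constructor
  · intro h
    by_contra hg
    set g : ℕ := Int.gcd N i with hgdef
    have hgN : (g : Int) ∣ N := Int.gcd_dvd_left N i
    have hgi : (g : Int) ∣ i := Int.gcd_dvd_right N i
    have hg0 : g ≠ 0 := by
      intro h0
      have := Int.gcd_eq_zero_iff.mp h0
      omega
    have hg2 : 2 ≤ (g : Int) := by
      have : 1 ≤ g := Nat.one_le_iff_ne_zero.mpr hg0
      have : g ≠ 1 := hg
      omega
    have hglei : (g : Int) ≤ i := Int.le_of_dvd (by omega) hgi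
    obtain ⟨j, hj⟩ := hgN
    obtain ⟨i', hi'⟩ := hgi
    have hj2 : 2 ≤ j := by nlinarith
    have hjN : j < N := by nlinarith
    exact h j hj2 hjN ⟨i', by rw [hi', hj]; ring⟩
  · intro h j hj2 hjN hdvd
    have hco : IsCoprime N i := Int.isCoprime_iff_gcd_eq_one.mpr h
    have : N ∣ j := hco.dvd_of_dvd_mul_left hdvd
    have := Int.le_of_dvd (by omega) this
    omega

-- the two per-candidate tests agree on range members
theorem tests_agree (N i : Int) (hi : i ∈ PySem.List.pyRange 2 N 1) :
    premierInner N i = (pyGcd N i == 1) := by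
  rw [PySem.List.mem_pyRange_one] at hi
  obtain ⟨hi2, hiN⟩ := hi
  have hN : 3 ≤ N := by omega
  have hg := pyGcd_eq_gcd N i (by omega) (by omega)
  have h1 : premierInner N i = true ↔ Int.gcd N i = 1 := by
    rw [premierInner, foldl_flag, Bool.true_and, List.all_eq_true]
    rw [← no_multiple_iff_coprime N i hN hi2 hiN]
    constructor
    · intro h j hj2 hjN hdvd
      have hj : j ∈ PySem.List.pyRange 2 N 1 := PySem.List.mem_pyRange_one.mpr ⟨hj2, hjN⟩
      have := h j hj
      simp only [Bool.not_eq_eq_eq_not, Bool.not_true, beq_eq_false_iff_ne] at this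
      exact this ((PySem.Int.mod_eq_zero_iff_dvd _ _).mpr hdvd)
    · intro h j hj
      rw [PySem.List.mem_pyRange_one] at hj
      simp only [Bool.not_eq_eq_eq_not, Bool.not_true, beq_eq_false_iff_ne]
      intro hz
      exact h j hj.1 hj.2 ((PySem.Int.mod_eq_zero_iff_dvd _ _).mp hz)
  have h2 : (pyGcd N i == 1) = true ↔ Int.gcd N i = 1 := by
    rw [hg]; simp
  exact Bool.eq_iff_iff.mpr (h1.trans h2.symm)

-- loops over a common list with agreeing tests return the same
theorem loops_eq (N : Int) :
    ∀ l : List Int, (∀ i ∈ l, premierInner N i = (pyGcd N i == 1)) →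
      premierLoop N l = altLoop N l := by
  intro l
  induction l with
  | nil => intro _; rfl
  | cons x xs ih =>
      intro h
      simp only [premierLoop, altLoop, h x (List.mem_cons_self ..)]
      split
      · rfl
      · exact ih (fun i hi => h i (List.mem_cons_of_mem _ hi))

-- ===== VERDICT (by name: the statement is the Claim_ definition above) =====
theorem premier_avec_N_spec : Claim_equal_premier_avec_N := by
  intro N _
  unfold Spec_premier_avec_N premier_avec_N premier_avec_N_alt
  exact loops_eq N _ (fun i hi => tests_agree N i hi)
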